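-- pv_equiv track=rewrite | github.com/Techsupport254/tabitha-project | backend/medication_recommender.py | _check_contraindications
-- ===== SOURCE A (Python) =====
-- from typing import List, Dict, Set, Tuple, Any
--
-- def _check_contraindications(
--                             medication: Dict,
--                             patient_history: Dict) -> bool:
--     """Check if medication is contraindicated based on patient history."""
--     if 'contraindications' not in medication:
--         return False
--
--     for condition in medication['contraindications']:
--         if condition in patient_history.get('conditions', []):
--             return True
--
--     return False
-- ===== SOURCE B (Python) =====
-- def _check_contraindications(medication, patient_history):
--     """Check if medication is contraindicated based on patient history."""
--     if 'contraindications' not in medication: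
--         return False
--     xs = sorted(medication['contraindications'])
--     ys = sorted(patient_history.get('conditions', []))
--     i = j = 0
--     while i < len(xs) and j < len(ys):
--         if xs[i] == ys[j]:
--             return True
--         if xs[i] < ys[j]:
--             i += 1
--         else:
--             j += 1
--     return False
-- ===== Notes on version B (the rewrite author's own statement) =====
-- stated objective: alternative
-- what changed: B sorts both lists and runs a single two-pointer merge scan over the two sorted lists to detect a common element, instead of A's nested scan testing each contraindication against the conditions list.
import Mathlib
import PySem

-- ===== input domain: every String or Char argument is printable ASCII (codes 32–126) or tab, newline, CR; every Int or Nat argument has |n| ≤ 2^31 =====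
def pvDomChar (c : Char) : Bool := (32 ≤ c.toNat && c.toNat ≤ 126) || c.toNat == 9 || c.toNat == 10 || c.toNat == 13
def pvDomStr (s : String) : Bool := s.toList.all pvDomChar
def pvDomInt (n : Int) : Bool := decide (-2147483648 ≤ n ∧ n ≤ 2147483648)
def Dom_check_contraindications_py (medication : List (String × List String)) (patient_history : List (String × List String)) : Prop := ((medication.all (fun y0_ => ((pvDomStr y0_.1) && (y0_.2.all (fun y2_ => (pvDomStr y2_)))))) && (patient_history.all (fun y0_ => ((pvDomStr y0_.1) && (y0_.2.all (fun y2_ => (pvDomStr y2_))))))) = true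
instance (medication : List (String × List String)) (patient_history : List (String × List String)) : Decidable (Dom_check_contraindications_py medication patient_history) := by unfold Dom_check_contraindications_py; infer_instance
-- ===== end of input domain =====

-- B sorts both lists and detects a common element by a two-pointer merge scan;
-- an alternative of similar cost, not claimed faster.

-- ===== PORT A =====
-- Port of A: scan the contraindications, testing each against the conditions list (early return on hit).
def check_contraindications_py (medication : List (String × List String)) (patient_history : List (String × List String)) : Bool :=
  match medication.lookup "contraindications" with
  | none => false
  | some contras =>
      let conds := (patient_history.lookup "conditions").getD []
      contras.any (fun condition => conds.contains condition)

-- ===== PORT B =====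
-- B's while loop over indices i, j, ported as the obvious structural recursion on the two suffixes.
def pvMergeScan : List String → List String → Bool
  | [], _ => false
  | _ :: _, [] => false
  | a :: as, b :: bs =>
      if a = b then true
      else if a < b then pvMergeScan as (b :: bs)
      else pvMergeScan (a :: as) bs

-- Port of B: sort both lists, then run the two-pointer merge scan.
def check_contraindications_py_alt (medication : List (String × List String)) (patient_history : List (String × List String)) : Bool :=
  match medication.lookup "contraindications" with
  | none => false
  | some contras =>
      let xs := PySem.List.sorted contras (fun x => x) false
      let ys := PySem.List.sorted ((patient_history.lookup "conditions").getD []) (fun x => x) false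
      pvMergeScan xs ys

-- ===== PRECONDITION & SPEC =====
def Spec_check_contraindications_py (medication : List (String × List String)) (patient_history : List (String × List String)) (out : Bool) : Prop := out = check_contraindications_py_alt medication patient_history
instance (medication : List (String × List String)) (patient_history : List (String × List String)) (out : Bool) : Decidable (Spec_check_contraindications_py medication patient_history out) := by unfold Spec_check_contraindications_py; infer_instance

-- ===== CLAIM (what is proved, stated in full; the proofs are below) =====
def Claim_equal_check_contraindications_py : Prop := ∀ (medication : List (String × List String)) (patient_history : List (String × List String)), Dom_check_contraindications_py medication patient_history → Spec_check_contraindications_py medication patient_history (check_contraindications_py medication patient_history)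

-- ===== LEMMAS AND PROOFS =====

-- On sorted lists, the merge scan is true exactly when the lists share an element.
theorem pvMergeScan_iff (xs ys : List String)
    (hx : xs.Pairwise (· ≤ ·)) (hy : ys.Pairwise (· ≤ ·)) :
    pvMergeScan xs ys = true ↔ ∃ c, c ∈ xs ∧ c ∈ ys := by
  induction xs, ys using pvMergeScan.induct with
  | case1 ys => simp [pvMergeScan]
  | case2 a as => simp [pvMergeScan]
  | case3 as b bs =>
      simp only [pvMergeScan]
      exact ⟨fun _ => ⟨b, by simp, by simp⟩, fun _ => by simp⟩
  | case4 a as b bs hne hlt ih =>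
      simp only [pvMergeScan, if_neg hne, if_pos hlt]
      rw [ih hx.tail hy]
      constructor
      · rintro ⟨c, hc1, hc2⟩; exact ⟨c, List.mem_cons_of_mem _ hc1, hc2⟩
      · rintro ⟨c, hc1, hc2⟩
        rcases List.mem_cons.mp hc1 with rfl | hc1
        · rcases List.mem_cons.mp hc2 with rfl | hc2
          · exact absurd rfl hne
          · have : b ≤ c := List.rel_of_pairwise_cons hy hc2
            exact absurd (lt_of_lt_of_le hlt this) (lt_irrefl c)
        · exact ⟨c, hc1, hc2⟩
  | case5 a as b bs hne hnlt ih =>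
      simp only [pvMergeScan, if_neg hne, if_neg hnlt]
      rw [ih hx hy.tail]
      have hba : b < a := lt_of_le_of_ne (not_lt.mp hnlt) (fun h => hne h.symm)
      constructor
      · rintro ⟨c, hc1, hc2⟩; exact ⟨c, hc1, List.mem_cons_of_mem _ hc2⟩
      · rintro ⟨c, hc1, hc2⟩
        rcases List.mem_cons.mp hc2 with rfl | hc2
        · rcases List.mem_cons.mp hc1 with rfl | hc1
          · exact absurd rfl hne
          · have : a ≤ c := List.rel_of_pairwise_cons hx hc1
            exact absurd (lt_of_lt_of_le hba this) (lt_irrefl c)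
        · exact ⟨c, hc1, hc2⟩

-- ===== VERDICT (by name: the statement is the Claim_ definition above) =====
theorem check_contraindications_py_spec : Claim_equal_check_contraindications_py := by
  intro medication patient_history _
  unfold Spec_check_contraindications_py check_contraindications_py check_contraindications_py_alt
  cases medication.lookup "contraindications" with
  | none => rfl
  | some contras =>
      simp only []
      rw [Bool.eq_iff_iff]
      rw [pvMergeScan_iff _ _ (PySem.List.sorted_pairwise contras (fun x => x) )
            (PySem.List.sorted_pairwise _ (fun x => x))]
      simp only [List.any_eq_true, List.contains_eq_mem, decide_eq_true_eq, PySem.List.mem_sorted]
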